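-- pv_equiv track=rewrite | github.com/Vineyardcode/voynich_slop | scripts/f66r_analysis.py | parse_word
-- ===== SOURCE A (Python) =====
-- PREFIXES = [
--     "qol", "qor", "sol", "sor", "dol", "dor", "dyl", "dyr",
--     "qo", "so", "do", "dy", "ol", "or", "yl", "yr",
--     "q", "d", "s", "o", "y", "l", "r",
-- ]
--
-- ROOT_ONSETS = [
--     "ckh", "cth", "cph", "cfh", "tch", "kch", "pch", "fch",
--     "tsh", "ksh", "psh", "fsh", "sh", "ch", "f", "p", "k", "t",
-- ]
--
-- ROOT_BODIES = [
--     "eeed", "eees", "eeea", "eeeo", "eed", "ees", "eea", "eeo",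
--     "ed", "es", "ea", "eo", "eee", "ee", "e",
--     "da", "do", "sa", "so", "d", "s", "a", "o",
-- ]
--
-- SUFFIXES = [
--     "iiiny", "iiny", "iiir", "iiil", "iiin", "iir", "iil", "iin", "iim", "iid",
--     "iry", "ily", "iny", "ir", "il", "in", "im", "id", "iii", "ii",
--     "dy", "ly", "ry", "ny", "my", "i", "y", "n", "m", "d", "l", "r",
-- ]
--
-- def parse_word(word):
--     best = None; best_score = -1
--     pfx_opts = [""]
--     for pfx in PREFIXES:
--         if word.startswith(pfx): pfx_opts.append(pfx)
--     for pfx in pfx_opts: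
--         r1 = word[len(pfx):]
--         onset_opts = [""]
--         for o in ROOT_ONSETS:
--             if r1.startswith(o): onset_opts.append(o)
--         for onset in onset_opts:
--             r2 = r1[len(onset):]
--             body_opts = [""]
--             for b in ROOT_BODIES:
--                 if r2.startswith(b): body_opts.append(b)
--             for body in body_opts:
--                 r3 = r2[len(body):]
--                 suf_opts = [""]
--                 for s in SUFFIXES:
--                     if r3 == s: suf_opts.append(s)
--                 for suf in suf_opts:
--                     if suf:
--                         remainder = "" if r3 == suf else (r3[:-len(suf)] if r3.endswith(suf) else r3)
--                     else:
--                         remainder = r3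
--                     explained = len(pfx) + len(onset) + len(body) + len(suf)
--                     score = explained * 10 - len(remainder) * 15
--                     if not remainder: score += 50
--                     if onset or body: score += 20
--                     if not onset and not body and (pfx or suf): score -= 10
--                     if score > best_score:
--                         best_score = score
--                         best = (pfx, onset, body, suf, remainder)
--     if best is None: return ("", "", "", "", word)
--     return best
-- ===== SOURCE B (Python) =====
-- # Table-driven recursive segmenter: one generic stage recursion replaces A's four
-- # copy-pasted nested loops; the remainder is just the unconsumed rest at the leaf.
-- PREFIXES = [
--     "qol", "qor", "sol", "sor", "dol", "dor", "dyl", "dyr",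
--     "qo", "so", "do", "dy", "ol", "or", "yl", "yr",
--     "q", "d", "s", "o", "y", "l", "r",
-- ]
--
-- ROOT_ONSETS = [
--     "ckh", "cth", "cph", "cfh", "tch", "kch", "pch", "fch",
--     "tsh", "ksh", "psh", "fsh", "sh", "ch", "f", "p", "k", "t",
-- ]
--
-- ROOT_BODIES = [
--     "eeed", "eees", "eeea", "eeeo", "eed", "ees", "eea", "eeo",
--     "ed", "es", "ea", "eo", "eee", "ee", "e",
--     "da", "do", "sa", "so", "d", "s", "a", "o",
-- ]
--
-- SUFFIXES = [
--     "iiiny", "iiny", "iiir", "iiil", "iiin", "iir", "iil", "iin", "iim", "iid",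
--     "iry", "ily", "iny", "ir", "il", "in", "im", "id", "iii", "ii",
--     "dy", "ly", "ry", "ny", "my", "i", "y", "n", "m", "d", "l", "r",
-- ]
--
-- # (table, whole) -- 'whole' stages must consume the entire rest, prefix stages any prefix.
-- STAGES = [(PREFIXES, False), (ROOT_ONSETS, False), (ROOT_BODIES, False), (SUFFIXES, True)]
--
--
-- def score(c):
--     """Score of a candidate [pfx, onset, body, suf, remainder]."""
--     pfx, onset, body, suf, remainder = c
--     sc = (len(pfx) + len(onset) + len(body) + len(suf)) * 10 - len(remainder) * 15
--     if not remainder: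
--         sc += 50
--     if onset or body:
--         sc += 20
--     if not onset and not body and (pfx or suf):
--         sc -= 10
--     return sc
--
--
-- def best(stages, rest, acc):
--     """Best (leftmost-maximal by score) segmentation of rest through the stages,
--     with the already-chosen parts in acc; the leaf's unconsumed rest is the remainder."""
--     if not stages:
--         return acc + [rest]
--     table, whole = stages[0]
--     matches = [t for t in table if (rest == t if whole else rest.startswith(t))]
--     best_c = best(stages[1:], rest, acc + [""])
--     for o in matches:
--         c = best(stages[1:], rest[len(o):], acc + [o])
--         if score(c) > score(best_c):
--             best_c = c
--     return best_c
--
--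
-- def parse_word(word):
--     c = best(STAGES, word, [])
--     if score(c) < 0:
--         return ("", "", "", "", word)
--     return tuple(c)
-- ===== Notes on version B (the rewrite author's own statement) =====
-- stated objective: simpler
-- what changed: B replaces A's four copy-pasted nested loops threading a best/best_score accumulator by one generic table-driven recursion over a STAGES list (table + whole/prefix match flag); the remainder is simply the unconsumed rest at the recursion leaf, so A's endswith/strip remainder if-chain disappears, and each level keeps the leftmost strictly-better child, which reproduces A's first-maximal tie-break.
import Mathlib
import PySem

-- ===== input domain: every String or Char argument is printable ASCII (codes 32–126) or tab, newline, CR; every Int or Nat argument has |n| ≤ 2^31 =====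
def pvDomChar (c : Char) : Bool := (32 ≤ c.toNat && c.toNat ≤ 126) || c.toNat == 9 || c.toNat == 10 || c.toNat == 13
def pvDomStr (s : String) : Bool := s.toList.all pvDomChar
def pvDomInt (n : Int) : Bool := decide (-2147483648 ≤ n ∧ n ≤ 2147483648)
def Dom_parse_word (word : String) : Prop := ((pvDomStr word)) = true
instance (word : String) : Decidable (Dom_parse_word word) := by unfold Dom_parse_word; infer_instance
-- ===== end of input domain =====

-- B replaces A's four copy-pasted nested loops (threading best/best_score) by one generic
-- table-driven recursion over a STAGES list; the remainder is the unconsumed rest at the leaf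
-- (objective: simpler).

-- ===== PORT A =====
-- module constants (shared by both Pythons)
def PREFIXES : List String := [
  "qol", "qor", "sol", "sor", "dol", "dor", "dyl", "dyr",
  "qo", "so", "do", "dy", "ol", "or", "yl", "yr",
  "q", "d", "s", "o", "y", "l", "r"]

def ROOT_ONSETS : List String := [
  "ckh", "cth", "cph", "cfh", "tch", "kch", "pch", "fch",
  "tsh", "ksh", "psh", "fsh", "sh", "ch", "f", "p", "k", "t"]

def ROOT_BODIES : List String := [
  "eeed", "eees", "eeea", "eeeo", "eed", "ees", "eea", "eeo",
  "ed", "es", "ea", "eo", "eee", "ee", "e",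
  "da", "do", "sa", "so", "d", "s", "a", "o"]

def SUFFIXES : List String := [
  "iiiny", "iiny", "iiir", "iiil", "iiin", "iir", "iil", "iin", "iim", "iid",
  "iry", "ily", "iny", "ir", "il", "in", "im", "id", "iii", "ii",
  "dy", "ly", "ry", "ny", "my", "i", "y", "n", "m", "d", "l", "r"]

-- literal transliteration of A: nested loops threading the (best, best_score) accumulator
def parse_word (word : String) : String × String × String × String × String :=
  let pfx_opts := PREFIXES.foldl (fun acc p => if PySem.Str.startswith word p then acc ++ [p] else acc) [""]
  let st : Option (String × String × String × String × String) × Int :=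
    pfx_opts.foldl (fun st pfx =>
      let r1 := PySem.Str.slice word (some (PySem.Str.len pfx)) none
      let onset_opts := ROOT_ONSETS.foldl (fun acc o => if PySem.Str.startswith r1 o then acc ++ [o] else acc) [""]
      onset_opts.foldl (fun st onset =>
        let r2 := PySem.Str.slice r1 (some (PySem.Str.len onset)) none
        let body_opts := ROOT_BODIES.foldl (fun acc b => if PySem.Str.startswith r2 b then acc ++ [b] else acc) [""]
        body_opts.foldl (fun st body =>
          let r3 := PySem.Str.slice r2 (some (PySem.Str.len body)) none
          let suf_opts := SUFFIXES.foldl (fun acc s => if r3 == s then acc ++ [s] else acc) [""]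
          suf_opts.foldl (fun st suf =>
            let remainder := if suf != "" then (if r3 == suf then "" else (if PySem.Str.endswith r3 suf then PySem.Str.slice r3 none (some (-(PySem.Str.len suf))) else r3)) else r3
            let explained := PySem.Str.len pfx + PySem.Str.len onset + PySem.Str.len body + PySem.Str.len suf
            let score := explained * 10 - PySem.Str.len remainder * 15
            let score := if remainder == "" then score + 50 else score
            let score := if onset != "" || body != "" then score + 20 else score
            let score := if onset == "" && body == "" && (pfx != "" || suf != "") then score - 10 else score
            if score > st.2 then (some (pfx, onset, body, suf, remainder), score) else st) st) st) st)
      (none, -1)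
  match st.1 with
  | none => ("", "", "", "", word)
  | some best => best

-- ===== PORT B =====
-- Source B: STAGES — each stage is a table plus a flag: whole-rest match (suffix) or prefix match
def STAGES : List (List String × Bool) :=
  [(PREFIXES, false), (ROOT_ONSETS, false), (ROOT_BODIES, false), (SUFFIXES, true)]

-- Source B: score of a candidate [pfx, onset, body, suf, remainder]
-- (the wildcard branch is unreachable: `best` always yields 5 parts, cf. candL_shape below)
def scoreL (c : List String) : Int :=
  match c with
  | [pfx, onset, body, suf, remainder] =>
    let sc := (PySem.Str.len pfx + PySem.Str.len onset + PySem.Str.len body + PySem.Str.len suf) * 10 - PySem.Str.len remainder * 15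
    let sc := if remainder == "" then sc + 50 else sc
    let sc := if onset != "" || body != "" then sc + 20 else sc
    if onset == "" && body == "" && (pfx != "" || suf != "") then sc - 10 else sc
  | _ => 0

-- Source B: best — generic recursion over the stage list; the loop over `matches` keeping the
-- strictly-better child is the foldl, seeded with the empty-part child
def bestC : List (List String × Bool) → String → List String → List String
  | [], rest, acc => acc ++ [rest]
  | (table, whole) :: stages, rest, acc =>
    let ms := table.filter (fun t => if whole then rest == t else PySem.Str.startswith rest t)
    ms.foldl (fun best_c o =>
      let c := bestC stages (PySem.Str.slice rest (some (PySem.Str.len o)) none) (acc ++ [o])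
      if scoreL c > scoreL best_c then c else best_c)
      (bestC stages rest (acc ++ [""]))

-- Source B: tuple(c) on the 5-part candidate (the wildcard branch is unreachable)
def toT : List String → String × String × String × String × String
  | [p, o, b, s, r] => (p, o, b, s, r)
  | _ => ("", "", "", "", "")

def parse_word_alt (word : String) : String × String × String × String × String :=
  let c := bestC STAGES word []
  if scoreL c < 0 then ("", "", "", "", word) else toT c

-- ===== PRECONDITION & SPEC =====
def Spec_parse_word (word : String) (out : String × String × String × String × String) : Prop := out = parse_word_alt word
instance (word : String) (out : String × String × String × String × String) : Decidable (Spec_parse_word word out) := by unfold Spec_parse_word; infer_instance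

-- ===== CLAIM (what is proved, stated in full; the proofs are below) =====
def Claim_equal_parse_word : Prop := ∀ (word : String), Dom_parse_word word → Spec_parse_word word (parse_word word)

-- ===== LEMMAS AND PROOFS =====

-- score of a candidate as A computes it, on the 5-tuple
def scoreC : String × String × String × String × String → Int
  | (pfx, onset, body, suf, remainder) =>
    let sc := (PySem.Str.len pfx + PySem.Str.len onset + PySem.Str.len body + PySem.Str.len suf) * 10 - PySem.Str.len remainder * 15
    let sc := if remainder == "" then sc + 50 else sc
    let sc := if onset != "" || body != "" then sc + 20 else sc
    if onset == "" && body == "" && (pfx != "" || suf != "") then sc - 10 else sc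

-- the flat candidate list A's nested loops enumerate, as 5-tuples in A's order
def candidatesC (word : String) : List (String × String × String × String × String) :=
  ("" :: PREFIXES.filter (fun p => PySem.Str.startswith word p)).flatMap (fun pfx =>
    let r1 := PySem.Str.slice word (some (PySem.Str.len pfx)) none
    ("" :: ROOT_ONSETS.filter (fun o => PySem.Str.startswith r1 o)).flatMap (fun onset =>
      let r2 := PySem.Str.slice r1 (some (PySem.Str.len onset)) none
      ("" :: ROOT_BODIES.filter (fun b => PySem.Str.startswith r2 b)).flatMap (fun body =>
        let r3 := PySem.Str.slice r2 (some (PySem.Str.len body)) none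
        ("" :: SUFFIXES.filter (fun s => r3 == s)).map (fun suf =>
          (pfx, onset, body, suf, if suf == "" then r3 else "")))))

-- the flat candidate list B's recursion explores, as 5-element lists, in the same order
def candL : List (List String × Bool) → String → List String → List (List String)
  | [], rest, acc => [acc ++ [rest]]
  | (table, whole) :: stages, rest, acc =>
    ("" :: table.filter (fun t => if whole then rest == t else PySem.Str.startswith rest t)).flatMap
      (fun o => candL stages (PySem.Str.slice rest (some (PySem.Str.len o)) none) (acc ++ [o]))

-- A's running (best, best_score) update, per candidate
def updC (st : Option (String × String × String × String × String) × Int)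
    (c : String × String × String × String × String) :
    Option (String × String × String × String × String) × Int :=
  if scoreC c > st.2 then (some c, scoreC c) else st

-- keep the strictly-better candidate (left bias = first-maximal tie-break), tuple/list versions
def pickC (cur c : String × String × String × String × String) :
    String × String × String × String × String :=
  if scoreC c > scoreC cur then c else cur

def pickL (cur c : List String) : List String :=
  if scoreL c > scoreL cur then c else cur

-- first-maximal element of a nonempty candidate list
def amaxL (l : List (List String)) : List String :=
  match l with
  | [] => []
  | h :: t => t.foldl pickL h

lemma str_slice_zero (s : String) : PySem.Str.slice s (some 0) none = s := by
  simp [PySem.Str.slice, PySem.Chars.slice_eq_listSlice]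

lemma str_slice_len (s : String) : PySem.Str.slice s (some (PySem.Str.len s)) none = "" := by
  simp [PySem.Str.slice, PySem.Chars.slice_eq_listSlice, PySem.Str.len_eq,
    PySem.List.slice_from_natCast]

lemma str_slice_len_empty (s : String) : PySem.Str.slice s (some (PySem.Str.len "")) none = s := by
  have h : PySem.Str.len "" = 0 := by decide
  rw [h]; exact str_slice_zero s

lemma suffixes_ne_empty : ∀ s ∈ SUFFIXES, s ≠ "" := by decide

lemma candL_ne_nil : ∀ (stages : List (List String × Bool)) (rest : String) (acc : List String),
    candL stages rest acc ≠ [] := by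
  intro stages
  induction stages with
  | nil => intro rest acc h; simp [candL] at h
  | cons st stages ih =>
    intro rest acc h
    obtain ⟨table, whole⟩ := st
    simp only [candL, List.flatMap_cons] at h
    exact ih _ _ (List.append_eq_nil_iff.1 h).1

lemma candL_shape : ∀ (stages : List (List String × Bool)) (rest : String) (acc : List String),
    ∀ c ∈ candL stages rest acc, ∃ l, c = acc ++ l ∧ l.length = stages.length + 1 := by
  intro stages
  induction stages with
  | nil =>
    intro rest acc c hc
    simp only [candL, List.mem_singleton] at hc
    exact ⟨[rest], hc, rfl⟩
  | cons st stages ih =>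
    intro rest acc c hc
    obtain ⟨table, whole⟩ := st
    simp only [candL, List.mem_flatMap] at hc
    obtain ⟨o, _, hco⟩ := hc
    obtain ⟨l, hl, hlen⟩ := ih _ _ c hco
    exact ⟨o :: l, by simpa using hl, by simpa using hlen⟩

lemma pickL_assoc (a h c : List String) : pickL (pickL a h) c = pickL a (pickL h c) := by
  unfold pickL
  split_ifs <;> first | rfl | omega

lemma foldl_pickL_start (t : List (List String)) :
    ∀ a h, t.foldl pickL (pickL a h) = pickL a (t.foldl pickL h) := by
  induction t with
  | nil => intro a h; rfl
  | cons c t ih =>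
    intro a h
    simp only [List.foldl_cons, pickL_assoc a h c, ih]

lemma amaxL_append (xs ys : List (List String)) (hx : xs ≠ []) (hy : ys ≠ []) :
    amaxL (xs ++ ys) = pickL (amaxL xs) (amaxL ys) := by
  cases xs with
  | nil => exact absurd rfl hx
  | cons h t =>
    cases ys with
    | nil => exact absurd rfl hy
    | cons h' t' =>
      simp only [amaxL, List.cons_append, List.foldl_cons, List.foldl_append, List.foldl_cons]
      rw [← foldl_pickL_start t' (t.foldl pickL h) h']

lemma amaxL_flatMap (g : String → List (List String)) (hg : ∀ o, g o ≠ []) (o : String)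
    (os : List String) :
    amaxL ((o :: os).flatMap g)
      = (os.map (fun o' => amaxL (g o'))).foldl pickL (amaxL (g o)) := by
  induction os generalizing o with
  | nil => simp [List.flatMap_cons]
  | cons o' os ih =>
    have hne : (o' :: os).flatMap g ≠ [] := by
      simp only [List.flatMap_cons]
      intro h
      exact hg o' (List.append_eq_nil_iff.1 h).1
    rw [List.flatMap_cons, amaxL_append (g o) _ (hg o) hne, ih o', List.map_cons,
      List.foldl_cons, ← foldl_pickL_start]

lemma amaxL_mem (h : List String) (t : List (List String)) : t.foldl pickL h ∈ h :: t := by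
  induction t generalizing h with
  | nil => simp
  | cons c t ih =>
    simp only [List.foldl_cons]
    by_cases hc : scoreL c > scoreL h
    · rw [show pickL h c = c from if_pos hc]
      exact List.mem_cons_of_mem h (ih c)
    · rw [show pickL h c = h from if_neg hc]
      rcases List.mem_cons.1 (ih h) with h1 | h1
      · exact List.mem_cons.2 (Or.inl h1)
      · exact List.mem_cons.2 (Or.inr (List.mem_cons.2 (Or.inr h1)))

-- B's recursion computes the first-maximal element of its candidate list
lemma bestC_eq : ∀ (stages : List (List String × Bool)) (rest : String) (acc : List String),
    bestC stages rest acc = amaxL (candL stages rest acc) := by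
  intro stages
  induction stages with
  | nil => intro rest acc; simp [bestC, candL, amaxL]
  | cons st stages ih =>
    intro rest acc
    obtain ⟨table, whole⟩ := st
    simp only [bestC, candL, ih]
    rw [amaxL_flatMap _ (fun o => candL_ne_nil stages _ _), str_slice_len_empty rest,
      List.foldl_map]
    rfl


-- ---- A side: the nested loops compute the fold of updC over the flat tuple list ----

lemma foldA_eq (word : String) :
    parse_word word
    = (match ((candidatesC word).foldl updC (none, -1)).1 with
       | none => ("", "", "", "", word)
       | some best => best) := by
  have hf :
    (PREFIXES.foldl (fun acc p => if PySem.Str.startswith word p then acc ++ [p] else acc) [""]).foldl (fun st pfx =>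
      let r1 := PySem.Str.slice word (some (PySem.Str.len pfx)) none
      let onset_opts := ROOT_ONSETS.foldl (fun acc o => if PySem.Str.startswith r1 o then acc ++ [o] else acc) [""]
      onset_opts.foldl (fun st onset =>
        let r2 := PySem.Str.slice r1 (some (PySem.Str.len onset)) none
        let body_opts := ROOT_BODIES.foldl (fun acc b => if PySem.Str.startswith r2 b then acc ++ [b] else acc) [""]
        body_opts.foldl (fun st body =>
          let r3 := PySem.Str.slice r2 (some (PySem.Str.len body)) none
          let suf_opts := SUFFIXES.foldl (fun acc s => if r3 == s then acc ++ [s] else acc) [""]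
          suf_opts.foldl (fun st suf =>
            let remainder := if suf != "" then (if r3 == suf then "" else (if PySem.Str.endswith r3 suf then PySem.Str.slice r3 none (some (-(PySem.Str.len suf))) else r3)) else r3
            let explained := PySem.Str.len pfx + PySem.Str.len onset + PySem.Str.len body + PySem.Str.len suf
            let score := explained * 10 - PySem.Str.len remainder * 15
            let score := if remainder == "" then score + 50 else score
            let score := if onset != "" || body != "" then score + 20 else score
            let score := if onset == "" && body == "" && (pfx != "" || suf != "") then score - 10 else score
            if score > st.2 then (some (pfx, onset, body, suf, remainder), score) else st) st) st) st)
      ((none : Option (String × String × String × String × String)), (-1 : Int))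
      = (candidatesC word).foldl updC (none, -1) := by
    simp only [PySem.List.foldl_append_if_eq_filter, List.singleton_append, candidatesC]
    rw [List.foldl_flatMap]
    apply PySem.List.foldl_congr_mem
    intro st pfx _
    dsimp only
    rw [List.foldl_flatMap]
    apply PySem.List.foldl_congr_mem
    intro st onset _
    dsimp only
    rw [List.foldl_flatMap]
    apply PySem.List.foldl_congr_mem
    intro st body _
    dsimp only
    rw [List.foldl_map]
    apply PySem.List.foldl_congr_mem
    intro st suf hsuf
    dsimp only
    rcases List.mem_cons.1 hsuf with rfl | hmem
    · simp [updC, scoreC]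
    · obtain ⟨hS, hbeq⟩ := List.mem_filter.1 hmem
      have hEq := eq_of_beq hbeq
      have hne : suf ≠ "" := suffixes_ne_empty suf hS
      rw [hEq]
      simp [updC, scoreC, hne]
  show (match (
    (PREFIXES.foldl (fun acc p => if PySem.Str.startswith word p then acc ++ [p] else acc) [""]).foldl (fun st pfx =>
      let r1 := PySem.Str.slice word (some (PySem.Str.len pfx)) none
      let onset_opts := ROOT_ONSETS.foldl (fun acc o => if PySem.Str.startswith r1 o then acc ++ [o] else acc) [""]
      onset_opts.foldl (fun st onset =>
        let r2 := PySem.Str.slice r1 (some (PySem.Str.len onset)) none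
        let body_opts := ROOT_BODIES.foldl (fun acc b => if PySem.Str.startswith r2 b then acc ++ [b] else acc) [""]
        body_opts.foldl (fun st body =>
          let r3 := PySem.Str.slice r2 (some (PySem.Str.len body)) none
          let suf_opts := SUFFIXES.foldl (fun acc s => if r3 == s then acc ++ [s] else acc) [""]
          suf_opts.foldl (fun st suf =>
            let remainder := if suf != "" then (if r3 == suf then "" else (if PySem.Str.endswith r3 suf then PySem.Str.slice r3 none (some (-(PySem.Str.len suf))) else r3)) else r3
            let explained := PySem.Str.len pfx + PySem.Str.len onset + PySem.Str.len body + PySem.Str.len suf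
            let score := explained * 10 - PySem.Str.len remainder * 15
            let score := if remainder == "" then score + 50 else score
            let score := if onset != "" || body != "" then score + 20 else score
            let score := if onset == "" && body == "" && (pfx != "" || suf != "") then score - 10 else score
            if score > st.2 then (some (pfx, onset, body, suf, remainder), score) else st) st) st) st)
      ((none : Option (String × String × String × String × String)), (-1 : Int))
    ).1 with
    | none => ("", "", "", "", word)
    | some best => best) = _
  rw [hf]

lemma foldl_updC_some (cs : List (String × String × String × String × String)) :
    ∀ cur, cs.foldl updC (some cur, scoreC cur)
      = (some (cs.foldl pickC cur), scoreC (cs.foldl pickC cur)) := by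
  induction cs with
  | nil => intro cur; rfl
  | cons c cs ih =>
    intro cur
    simp only [List.foldl_cons]
    by_cases hc : scoreC c > scoreC cur
    · rw [show updC (some cur, scoreC cur) c = (some c, scoreC c) from by simp [updC, hc],
        show pickC cur c = c from by simp [pickC, hc]]
      exact ih c
    · rw [show updC (some cur, scoreC cur) c = (some cur, scoreC cur) from by simp [updC, hc],
        show pickC cur c = cur from by simp [pickC, hc]]
      exact ih cur

lemma le_scoreC_foldl_pickC (cs : List (String × String × String × String × String)) :
    ∀ cur, scoreC cur ≤ scoreC (cs.foldl pickC cur) := by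
  induction cs with
  | nil => intro cur; simp
  | cons c cs ih =>
    intro cur
    simp only [List.foldl_cons]
    by_cases hc : scoreC c > scoreC cur
    · rw [show pickC cur c = c from by simp [pickC, hc]]
      exact le_trans (le_of_lt hc) (ih c)
    · rw [show pickC cur c = cur from by simp [pickC, hc]]
      exact ih cur

lemma foldl_updC_none (cs : List (String × String × String × String × String)) :
    ∀ cur, scoreC cur ≤ -1 →
      cs.foldl updC (none, -1)
        = (if scoreC (cs.foldl pickC cur) > -1
           then (some (cs.foldl pickC cur), scoreC (cs.foldl pickC cur))
           else (none, -1)) := by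
  induction cs with
  | nil =>
    intro cur h
    simp only [List.foldl_nil]
    rw [if_neg (by omega)]
  | cons c cs ih =>
    intro cur h
    simp only [List.foldl_cons]
    by_cases hc : scoreC c > -1
    · rw [show updC (none, -1) c = (some c, scoreC c) from by simp [updC, hc],
        show pickC cur c = c from by simp [pickC]; omega,
        foldl_updC_some]
      have := le_scoreC_foldl_pickC cs c
      rw [if_pos (by omega)]
    · rw [show updC (none, -1) c = (none, -1) from by simp [updC, hc]]
      by_cases hcc : scoreC c > scoreC cur
      · rw [show pickC cur c = c from by simp [pickC, hcc]]
        exact ih c (by omega)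
      · rw [show pickC cur c = cur from by simp [pickC, hcc]]
        exact ih cur h

-- reading A's final state off is a max-then-threshold over the flat list
lemma fold_updC_eq (word : String) (h : String × String × String × String × String)
    (t : List (String × String × String × String × String)) :
    (match ((h :: t).foldl updC (none, -1)).1 with
     | none => ("", "", "", "", word)
     | some best => best)
    = (if scoreC (t.foldl pickC h) < 0
       then ("", "", "", "", word)
       else t.foldl pickC h) := by
  simp only [List.foldl_cons]
  by_cases hh : scoreC h > -1
  · rw [show updC (none, -1) h = (some h, scoreC h) from by simp [updC, hh],
      foldl_updC_some]
    have := le_scoreC_foldl_pickC t h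
    rw [if_neg (by omega)]
  · rw [show updC (none, -1) h = (none, -1) from by simp [updC, hh],
      foldl_updC_none t h (by omega)]
    by_cases hM : scoreC (t.foldl pickC h) > -1
    · rw [if_pos hM, if_neg (by omega)]
    · rw [if_neg hM, if_pos (by omega)]

-- ---- bridge: B's list candidates map onto A's tuple candidates ----

lemma scoreC_toT (p o b s r : String) : scoreC (p, o, b, s, r) = scoreL [p, o, b, s, r] := rfl

lemma list_len5 (l : List String) (hl : l.length = 5) :
    ∃ p o b s r, l = [p, o, b, s, r] := by
  rcases l with _ | ⟨p, _ | ⟨o, _ | ⟨b, _ | ⟨s, _ | ⟨r, _ | ⟨x, l⟩⟩⟩⟩⟩⟩ <;>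
    first
      | (exact ⟨_, _, _, _, _, rfl⟩)
      | simp_all

lemma map_toT (word : String) : (candL STAGES word []).map toT = candidatesC word := by
  simp only [STAGES, candL, candidatesC, List.map_flatMap, List.nil_append, Bool.false_eq_true,
    if_false, if_true]
  apply List.flatMap_congr
  intro pfx _
  dsimp only
  apply List.flatMap_congr
  intro onset _
  dsimp only
  apply List.flatMap_congr
  intro body _
  dsimp only
  simp only [List.map_eq_flatMap]
  apply List.flatMap_congr
  intro suf hsuf
  simp only [List.cons_append, List.nil_append]
  rcases List.mem_cons.1 hsuf with rfl | hmem
  · rw [str_slice_len_empty]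
    rfl
  · obtain ⟨hS, hbeq⟩ := List.mem_filter.1 hmem
    have hEq := eq_of_beq hbeq
    have hne : suf ≠ "" := suffixes_ne_empty suf hS
    rw [hEq, str_slice_len]
    simp [toT, hne]

lemma pickL_shape (h c : List String)
    (hh : ∃ p o b s r, h = [p, o, b, s, r]) (hc : ∃ p o b s r, c = [p, o, b, s, r]) :
    ∃ p o b s r, pickL h c = [p, o, b, s, r] := by
  unfold pickL
  split_ifs <;> assumption

lemma pickC_toT (h c : List String)
    (hh : ∃ p o b s r, h = [p, o, b, s, r]) (hc : ∃ p o b s r, c = [p, o, b, s, r]) :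
    pickC (toT h) (toT c) = toT (pickL h c) := by
  obtain ⟨p, o, b, s, r, rfl⟩ := hh
  obtain ⟨p', o', b', s', r', rfl⟩ := hc
  unfold pickC pickL
  rw [show toT [p, o, b, s, r] = (p, o, b, s, r) from rfl,
    show toT [p', o', b', s', r'] = (p', o', b', s', r') from rfl,
    scoreC_toT, scoreC_toT]
  split_ifs <;> rfl

lemma foldl_pickC_toT (t : List (List String)) :
    ∀ h, (∀ c ∈ h :: t, ∃ p o b s r, c = [p, o, b, s, r]) →
      (t.map toT).foldl pickC (toT h) = toT (t.foldl pickL h) := by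
  induction t with
  | nil => intro h _; rfl
  | cons c t ih =>
    intro h hsh
    simp only [List.map_cons, List.foldl_cons]
    have hh := hsh h (List.mem_cons_self ..)
    have hc := hsh c (List.mem_cons.2 (Or.inr (List.mem_cons_self ..)))
    rw [pickC_toT h c hh hc]
    apply ih
    intro x hx
    rcases List.mem_cons.1 hx with rfl | hx
    · exact pickL_shape h c hh hc
    · exact hsh x (List.mem_cons.2 (Or.inr (List.mem_cons.2 (Or.inr hx))))

-- ===== VERDICT (by name: the statement is the Claim_ definition above) =====
theorem parse_word_spec : Claim_equal_parse_word := by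
  intro word _
  unfold Spec_parse_word
  cases hcs : candL STAGES word [] with
  | nil => exact absurd hcs (candL_ne_nil _ _ _)
  | cons h t =>
    have hshape : ∀ c ∈ h :: t, ∃ p o b s r, c = [p, o, b, s, r] := by
      intro c hc
      obtain ⟨l, hl, hlen⟩ := candL_shape STAGES word [] c (hcs ▸ hc)
      exact list_len5 c (by simp [hl, hlen, STAGES])
    have hbest : bestC STAGES word [] = t.foldl pickL h := by
      rw [bestC_eq, hcs]
      rfl
    have hmap : candidatesC word = toT h :: t.map toT := by
      rw [← map_toT word, hcs, List.map_cons]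
    obtain ⟨p, o, b, s, r, hb5⟩ := hshape _ (amaxL_mem h t)
    rw [foldA_eq word, hmap, fold_updC_eq word (toT h) (t.map toT), foldl_pickC_toT t h hshape,
      show parse_word_alt word
        = (if scoreL (bestC STAGES word []) < 0 then ("", "", "", "", word) else toT (bestC STAGES word []))
        from rfl,
      hbest, hb5, show toT [p, o, b, s, r] = (p, o, b, s, r) from rfl, scoreC_toT]
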